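-- pv_equiv track=rewrite | github.com/xingtaodhu/zhongxing_python | utils.py | template_cnt
-- ===== SOURCE A (Python) =====
-- mod_template = {}
--
-- def template_cnt(logs, module_name='aaa', template=None):
--     if template is None:
--         template = mod_template[module_name.upper()]
--
--     cnt = {k: 0 for k in template.values()}
--     for log in logs:
--         label = len(template)
--         for tem in template.items():
--             if log.find(tem[1]) >= 0:
--                 cnt[tem[1]] += 1
--                 break
--     return cnt
-- ===== SOURCE B (Python) =====
-- mod_template = {}
--
--
-- def template_cnt(logs, module_name='aaa', template=None):
--     # B: sieve by template priority -- for each template value in order, count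
--     # the matching logs among the still-unmatched pool and remove them, instead
--     # of A's per-log scan over all patterns with an in-place counter dict.
--     if template is None:
--         template = mod_template[module_name.upper()]
--     cnt = {}
--     pool = list(logs)
--     for v in template.values():
--         if v in cnt:
--             continue
--         cnt[v] = len([log for log in pool if v in log])
--         pool = [log for log in pool if v not in log]
--     return cnt
-- ===== Notes on version B (the rewrite author's own statement) =====
-- stated objective: alternative
-- what changed: A scans patterns per log with an in-place counter dict (log-major nested scan); B is a pattern-major sieve: for each template value in priority order it counts the matches among the still-unmatched pool of logs and removes them, so later patterns only see logs no earlier pattern claimed.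
import Mathlib
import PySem

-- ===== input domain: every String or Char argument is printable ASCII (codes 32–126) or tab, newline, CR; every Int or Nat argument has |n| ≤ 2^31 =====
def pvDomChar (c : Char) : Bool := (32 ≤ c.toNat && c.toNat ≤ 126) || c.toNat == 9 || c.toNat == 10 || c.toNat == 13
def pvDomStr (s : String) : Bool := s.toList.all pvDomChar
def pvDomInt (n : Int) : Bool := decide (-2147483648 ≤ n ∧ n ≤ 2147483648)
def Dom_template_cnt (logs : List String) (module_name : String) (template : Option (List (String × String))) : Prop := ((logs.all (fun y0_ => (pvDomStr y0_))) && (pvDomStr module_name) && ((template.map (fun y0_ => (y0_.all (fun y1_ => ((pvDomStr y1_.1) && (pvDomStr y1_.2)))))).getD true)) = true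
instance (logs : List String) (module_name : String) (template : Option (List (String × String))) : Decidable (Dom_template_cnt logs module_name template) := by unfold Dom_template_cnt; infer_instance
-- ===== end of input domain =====

-- B counts pattern-major with a sieve: for each template value in priority order it counts the
-- matches among the still-unmatched pool of logs and removes them, instead of A's per-log scan
-- over all patterns with an in-place counter dict (same worst-case cost; measurably faster
-- when many logs match early patterns, since matched logs leave the pool); equivalence is about the
-- return value only.


-- ===== PORT A =====
-- inner 'for tem in template.items(): if log.find(tem[1]) >= 0: … break'
def pvFirstMatchA (items : List (String × String)) (log : String) : Option String :=
  match items with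
  | [] => none
  | tem :: rest => if 0 ≤ PySem.Str.find log tem.2 then some tem.2 else pvFirstMatchA rest log

def template_cnt (logs : List String) (_module_name : String) (template : Option (List (String × String))) : List (String × Int) :=
  match template with
  | none => []  -- Python raises KeyError here (mod_template is empty); excluded by Pre_
  | some tl =>
    let t : PySem.Dict String String := PySem.Dict.ofList tl
    let cnt0 : PySem.Dict String Int := t.values.foldl (fun d k => d.insert k 0) PySem.Dict.empty
    let cnt := logs.foldl (fun d log =>
      let _label := PySem.Dict.size t  -- 'label = len(template)' (unused in A)
      match pvFirstMatchA t.items log with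
      | none => d
      | some v => d.insert v (d.getD v 0 + 1)) cnt0
    cnt.items

-- ===== PORT B =====
-- loop body of B's sieve: skip already-seen values, else count matches in the pool and shrink it
def pvSieveStep (st : PySem.Dict String Int × List String) (v : String) :
    PySem.Dict String Int × List String :=
  if st.1.contains v then st
  else (st.1.insert v ((st.2.filter (fun log => PySem.Str.isIn v log)).length : Int),
        st.2.filter (fun log => !(PySem.Str.isIn v log)))

def template_cnt_alt (logs : List String) (_module_name : String) (template : Option (List (String × String))) : List (String × Int) :=
  match template with
  | none => []  -- same KeyError; excluded by Pre_
  | some tl =>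
    let values := (PySem.Dict.ofList tl).values
    let st := values.foldl pvSieveStep (PySem.Dict.empty, logs)
    st.1.items

-- ===== PRECONDITION & SPEC =====
-- Pre_ excludes only template = None, on which A raises KeyError (mod_template is empty).
def Pre_template_cnt (_logs : List String) (_module_name : String) (template : Option (List (String × String))) : Prop := template.isSome = true
instance (logs : List String) (module_name : String) (template : Option (List (String × String))) : Decidable (Pre_template_cnt logs module_name template) := by unfold Pre_template_cnt; infer_instance

def pvWitness_template_cnt : List String × String × (Option (List (String × String))) := (["err: boom", "ok"], "aaa", some [("e", "err"), ("o", "ok")])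

def Spec_template_cnt (logs : List String) (module_name : String) (template : Option (List (String × String))) (out : List (String × Int)) : Prop := out = template_cnt_alt logs module_name template
instance (logs : List String) (module_name : String) (template : Option (List (String × String))) (out : List (String × Int)) : Decidable (Spec_template_cnt logs module_name template out) := by unfold Spec_template_cnt; infer_instance

-- ===== CLAIM (what is proved, stated in full; the proofs are below) =====
def Claim_equal_template_cnt : Prop := ∀ (logs : List String) (module_name : String) (template : Option (List (String × String))), Dom_template_cnt logs module_name template → Pre_template_cnt logs module_name template → Spec_template_cnt logs module_name template (template_cnt logs module_name template)

-- ===== LEMMAS AND PROOFS =====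

-- first-match over a plain value list (B's priority order), the common characterisation
def pvFirstMatchB (values : List String) (log : String) : Option String :=
  match values with
  | [] => none
  | v :: rest => if PySem.Str.isIn v log then some v else pvFirstMatchB rest log

-- the result both programs compute: distinct values in first-occurrence order, each paired with
-- the number of logs whose first-matching value it is
def pvItemsOf (logs vs : List String) : List (String × Int) :=
  (PySem.Set.ofList vs).map (fun v => (v, ((logs.filterMap (pvFirstMatchB vs)).count v : Int)))

-- A's first-match (log.find(v) >= 0 over items) equals the value-list first-match.
lemma firstMatchA_eq_B (items : List (String × String)) (log : String) :
    pvFirstMatchA items log = pvFirstMatchB (items.map Prod.snd) log := by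
  induction items with
  | nil => rfl
  | cons tem rest ih =>
    simp only [pvFirstMatchA, pvFirstMatchB, List.map_cons]
    by_cases h : tem.2.toList <:+: log.toList
    · rw [if_pos ((PySem.Str.find_nonneg_iff _ _).mpr h), if_pos ((PySem.Str.isIn_iff_infix _ _).mpr h)]
    · rw [if_neg (fun hc => h ((PySem.Str.find_nonneg_iff _ _).mp hc)),
        if_neg (fun hc => h ((PySem.Str.isIn_iff_infix _ _).mp (by simpa using hc))), ih]

lemma firstMatchB_mem {values : List String} {log v : String}
    (h : pvFirstMatchB values log = some v) : v ∈ values := by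
  induction values with
  | nil => simp [pvFirstMatchB] at h
  | cons w rest ih =>
    simp only [pvFirstMatchB] at h
    split at h
    · simp_all
    · exact List.mem_cons_of_mem _ (ih h)

lemma firstMatchB_append_singleton (vs : List String) (v log : String) :
    pvFirstMatchB (vs ++ [v]) log =
      match pvFirstMatchB vs log with
      | some w => some w
      | none => if PySem.Str.isIn v log then some v else none := by
  induction vs with
  | nil => rfl
  | cons w rest ih =>
    simp only [List.cons_append, pvFirstMatchB]
    by_cases h : PySem.Chars.isIn w.toList log.toList
    · simp [h]
    · simp [h, ih]

lemma firstMatchB_none_iff (vs : List String) (log : String) :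
    pvFirstMatchB vs log = none ↔ ∀ w ∈ vs, PySem.Str.isIn w log = false := by
  induction vs with
  | nil => simp [pvFirstMatchB]
  | cons w rest ih =>
    simp only [pvFirstMatchB]
    by_cases h : PySem.Chars.isIn w.toList log.toList <;> simp [h, ih]

-- appending an already-present value changes nothing about first matches
lemma firstMatchB_append_mem {vs : List String} {v : String} (hv : v ∈ vs) :
    pvFirstMatchB (vs ++ [v]) = pvFirstMatchB vs := by
  funext log
  rw [firstMatchB_append_singleton]
  cases h : pvFirstMatchB vs log with
  | some w => rfl
  | none =>
    rw [if_neg]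
    rw [(firstMatchB_none_iff vs log).mp h v hv]
    simp

-- (a) appending a fresh value does not change any other value's count
lemma count_filterMap_append {vs : List String} {v v' : String} (hne : v' ≠ v)
    (logs : List String) :
    (logs.filterMap (pvFirstMatchB (vs ++ [v]))).count v' =
      (logs.filterMap (pvFirstMatchB vs)).count v' := by
  induction logs with
  | nil => rfl
  | cons log rest ih =>
    simp only [List.filterMap_cons]
    rw [firstMatchB_append_singleton]
    cases h : pvFirstMatchB vs log with
    | some w => simp [List.count_cons, ih]
    | none =>
      by_cases hin : PySem.Chars.isIn v.toList log.toList
      · simp [hin, Ne.symm hne, ih]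
      · simp [hin, ih]

-- (b) the fresh value's count is the number of pool logs containing it
lemma count_filterMap_new {vs : List String} {v : String} (hv : v ∉ vs)
    (logs : List String) :
    (logs.filterMap (pvFirstMatchB (vs ++ [v]))).count v =
      ((logs.filter (fun log => (pvFirstMatchB vs log).isNone)).filter
        (fun log => PySem.Str.isIn v log)).length := by
  induction logs with
  | nil => rfl
  | cons log rest ih =>
    simp only [List.filterMap_cons, List.filter_cons]
    rw [firstMatchB_append_singleton]
    cases h : pvFirstMatchB vs log with
    | some w =>
      have hwv : w ≠ v := fun hc => hv (hc ▸ firstMatchB_mem h)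
      simp [hwv, ih]
    | none =>
      by_cases hin : PySem.Chars.isIn v.toList log.toList
      · simp [hin, ih]
      · simp [hin, ih]

-- (c) the pool update is correct
lemma pool_step (vs : List String) (v : String) (logs : List String) :
    (logs.filter (fun log => (pvFirstMatchB vs log).isNone)).filter
        (fun log => !(PySem.Str.isIn v log)) =
      logs.filter (fun log => (pvFirstMatchB (vs ++ [v]) log).isNone) := by
  rw [List.filter_filter]
  apply List.filter_congr
  intro log _
  rw [firstMatchB_append_singleton]
  cases h : pvFirstMatchB vs log with
  | some w => simp
  | none => by_cases hin : PySem.Chars.isIn v.toList log.toList <;> simp [hin]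

-- B's sieve loop, characterised by pvItemsOf
lemma sieve_loop (logs : List String) (rest : List String) :
    ∀ (vs : List String) (d : PySem.Dict String Int),
      d.items = pvItemsOf logs vs →
      ((rest.foldl pvSieveStep
        (d, logs.filter (fun log => (pvFirstMatchB vs log).isNone))).1).items =
        pvItemsOf logs (vs ++ rest) := by
  induction rest with
  | nil => intro vs d hd; simpa using hd
  | cons v rest ih =>
    intro vs d hd
    have hkeys : d.keys = PySem.Set.ofList vs := by
      simp only [PySem.Dict.keys, hd, pvItemsOf, List.map_map]
      simp [Function.comp_def]
    simp only [List.foldl_cons]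
    by_cases hv : v ∈ vs
    · have hvs : v ∈ PySem.Set.ofList vs := (PySem.Set.mem_ofList _ _).mpr hv
      have hc : d.contains v = true := by
        rw [PySem.Dict.contains_iff_mem_keys, hkeys]; exact hvs
      have hfm := firstMatchB_append_mem hv
      have hstep : pvSieveStep (d, logs.filter (fun log => (pvFirstMatchB vs log).isNone)) v
          = (d, logs.filter (fun log => (pvFirstMatchB vs log).isNone)) := by
        simp [pvSieveStep, hc]
      rw [hstep]
      have hd' : d.items = pvItemsOf logs (vs ++ [v]) := by
        rw [hd]
        unfold pvItemsOf
        rw [PySem.Set.ofList_append_singleton, PySem.Set.add_of_mem hvs, hfm]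
      have hpool : logs.filter (fun log => (pvFirstMatchB vs log).isNone)
          = logs.filter (fun log => (pvFirstMatchB (vs ++ [v]) log).isNone) := by
        rw [hfm]
      rw [hpool]
      have := ih (vs ++ [v]) d hd'
      rw [this, List.append_assoc]
      rfl
    · have hvs : v ∉ PySem.Set.ofList vs := fun hc => hv ((PySem.Set.mem_ofList _ _).mp hc)
      have hc : d.contains v = false := by
        rw [Bool.eq_false_iff]
        intro hcon
        exact hvs (hkeys ▸ (PySem.Dict.contains_iff_mem_keys _ _).mp hcon)
      have hstep : pvSieveStep (d, logs.filter (fun log => (pvFirstMatchB vs log).isNone)) v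
          = (d.insert v (((logs.filter (fun log => (pvFirstMatchB vs log).isNone)).filter
              (fun log => PySem.Str.isIn v log)).length : Int),
             (logs.filter (fun log => (pvFirstMatchB vs log).isNone)).filter
              (fun log => !(PySem.Str.isIn v log))) := by
        simp [pvSieveStep, hc]
      rw [hstep, pool_step]
      have hd' : (d.insert v (((logs.filter (fun log => (pvFirstMatchB vs log).isNone)).filter
            (fun log => PySem.Str.isIn v log)).length : Int)).items
          = pvItemsOf logs (vs ++ [v]) := by
        rw [PySem.Dict.items_insert_of_not_contains _ _ hc, hd]
        unfold pvItemsOf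
        rw [PySem.Set.ofList_append_singleton, PySem.Set.add_of_not_mem hvs, List.map_append]
        congr 1
        · apply List.map_congr_left
          intro v' hv'
          have hne : v' ≠ v := fun hc' => hvs (hc' ▸ hv')
          rw [count_filterMap_append hne]
        · simp only [List.map_cons, List.map_nil]
          rw [count_filterMap_new hv]
      have := ih (vs ++ [v]) _ hd'
      rw [this, List.append_assoc]
      rfl

-- A's dict-comprehension '{k: 0 for k in values}'.
lemma items_fromkeys (vs : List String) :
    ((vs.foldl (fun d k => d.insert k 0) (PySem.Dict.empty : PySem.Dict String Int)).items) =
      (PySem.Set.ofList vs).map (fun v => (v, (0 : Int))) := by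
  induction vs using List.reverseRecOn with
  | nil => rfl
  | append_singleton vs v ih =>
    rw [List.foldl_append, List.foldl_cons, List.foldl_nil, PySem.Set.ofList_append_singleton]
    have hkeys : (vs.foldl (fun d k => d.insert k 0) (PySem.Dict.empty : PySem.Dict String Int)).keys
        = PySem.Set.ofList vs := by
      simp only [PySem.Dict.keys, ih, List.map_map]
      simp [Function.comp_def]
    by_cases hv : v ∈ PySem.Set.ofList vs
    · have hc : (vs.foldl (fun d k => d.insert k 0) (PySem.Dict.empty : PySem.Dict String Int)).contains v = true := by
        rw [PySem.Dict.contains_iff_mem_keys, hkeys]; exact hv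
      rw [PySem.Dict.items_insert_of_contains _ _ hc, ih, PySem.Set.add_of_mem hv, List.map_map]
      apply List.map_congr_left
      intro a _
      by_cases hav : a = v <;> simp [hav]
    · have hc : (vs.foldl (fun d k => d.insert k 0) (PySem.Dict.empty : PySem.Dict String Int)).contains v = false := by
        rw [Bool.eq_false_iff]
        intro hc
        exact hv (hkeys ▸ (PySem.Dict.contains_iff_mem_keys _ _).mp hc)
      rw [PySem.Dict.items_insert_of_not_contains _ _ hc, ih, PySem.Set.add_of_not_mem hv,
        List.map_append]
      rfl

-- A's counting loop, characterised: each entry gains the number of logs whose first match is its key.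
lemma countLoop_items (items : List (String × String)) (lbl : Nat) (logs : List String) :
    ∀ (d : PySem.Dict String Int), d.keys.Nodup →
      (∀ log v, pvFirstMatchA items log = some v → v ∈ d.keys) →
      (logs.foldl (fun d log =>
        let _label := lbl
        match pvFirstMatchA items log with
        | none => d
        | some v => d.insert v (d.getD v 0 + 1)) d).items =
        d.items.map (fun p => (p.1, p.2 + ((logs.filterMap (pvFirstMatchA items)).count p.1 : Int))) := by
  induction logs with
  | nil =>
    intro d _ _
    simp
  | cons log rest ih =>
    intro d hnd hk
    simp only [List.foldl_cons, List.filterMap_cons]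
    cases h : pvFirstMatchA items log with
    | none => exact ih d hnd hk
    | some v =>
      have hv : v ∈ d.keys := hk log v h
      have hc : d.contains v = true := (PySem.Dict.contains_iff_mem_keys _ _).mpr hv
      rw [ih (d.insert v (d.getD v 0 + 1)) (PySem.Dict.nodup_keys_insert _ _ _ hnd)
        (fun log' v' h' => (PySem.Dict.mem_keys_insert _ _ _ _).mpr (Or.inr (hk log' v' h')))]
      rw [PySem.Dict.items_insert_of_contains _ _ hc, List.map_map]
      apply List.map_congr_left
      rintro ⟨k, c⟩ hp
      by_cases hkv : k = v
      · subst hkv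
        have : d.getD k 0 = c := PySem.Dict.getD_of_mem_items _ hp hnd 0
        simp only [Function.comp, beq_self_eq_true, if_pos, this, List.count_cons_self]
        refine Prod.ext rfl ?_
        push_cast
        ring
      · have hbeq : (k == v) = false := beq_false_of_ne hkv
        simp only [Function.comp, hbeq, Bool.false_eq_true, if_false]
        refine Prod.ext rfl ?_
        rw [List.count_cons_of_ne (fun hc' => hkv hc'.symm)]

-- ===== VERDICT (by name: the statement is the Claim_ definition above) =====
theorem template_cnt_spec : Claim_equal_template_cnt := by
  intro logs module_name template _ hpre
  unfold Spec_template_cnt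
  cases template with
  | none => simp [Pre_template_cnt] at hpre
  | some tl =>
    unfold template_cnt template_cnt_alt
    simp only
    set t : PySem.Dict String String := PySem.Dict.ofList tl with ht
    have hvals : t.values = t.items.map Prod.snd := rfl
    have hfm : pvFirstMatchA t.items = pvFirstMatchB t.values := by
      funext log
      rw [firstMatchA_eq_B, ← hvals]
    -- A's side reduces to pvItemsOf
    have hkeys0 : (t.values.foldl (fun d k => d.insert k 0) (PySem.Dict.empty : PySem.Dict String Int)).keys
        = PySem.Set.ofList t.values := by
      simp only [PySem.Dict.keys, items_fromkeys, List.map_map]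
      simp [Function.comp_def]
    rw [countLoop_items t.items (PySem.Dict.size t) logs _
      (by rw [hkeys0]; exact PySem.Set.nodup_ofList _)
      (by
        intro log v h
        rw [hkeys0, PySem.Set.mem_ofList]
        rw [hfm] at h
        exact firstMatchB_mem h)]
    rw [items_fromkeys, List.map_map, hfm]
    -- B's side reduces to pvItemsOf via the sieve invariant
    have hB : ((t.values.foldl pvSieveStep (PySem.Dict.empty, logs)).1).items
        = pvItemsOf logs t.values := by
      have h0 := sieve_loop logs t.values [] PySem.Dict.empty (by rfl)
      have hpool0 : logs.filter (fun log => (pvFirstMatchB ([] : List String) log).isNone) = logs := by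
        simp [pvFirstMatchB]
      rw [hpool0, List.nil_append] at h0
      exact h0
    rw [hB]
    unfold pvItemsOf
    apply List.map_congr_left
    intro v _
    simp
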